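-- pv_equiv track=rewrite | github.com/sullik90/BMIN521-Assignment2 | Pipelines/LexiconFinder.py | __substituteTagInTweet
-- ===== SOURCE A (Python) =====
-- def __substituteTagInTweet(drugName: list, tweet_tokenized: list) -> list:
--     """
--     :param drugName: the drug name tokenized to substitute in the tweet
--     :param tweet_tokenized: the tweet tokenized where the drug name occurs and should be substituted, multiple occurrence are possible
--     """
--     tweet_tagged = []
--     ind = 0
--     while ind < len(tweet_tokenized):
--         tk = tweet_tokenized[ind]
--         # the token is not the start of a drug name, nothing to replace
--         if tk != drugName[0]:
--             tweet_tagged.append(tk)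
--             ind = ind+1
--         else:
--             # this token is the first token of the drug name, we need to check if the next tokens are in the drug name
--             isDrugName = True
--             posInTweet = ind
--             for drugTk in drugName:
--                 if posInTweet < len(tweet_tokenized) and drugTk == tweet_tokenized[posInTweet]:
--                     posInTweet = posInTweet+1
--                 else:
--                     isDrugName = False
--                     break
--             if not isDrugName:
--                 # it was the same token that the token starting a drug name but it is not the drug name
--                 tweet_tagged.append(tk)
--                 ind = ind+1
--             else:
--                 # it is an occurrence of the drug name we need to subsitute it and move to the next position
--                 tweet_tagged.append('__@DRUG@__')
--                 ind = ind + len(drugName)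
--
--     return tweet_tagged
-- ===== SOURCE B (Python) =====
-- def __substituteTagInTweet(drugName: list, tweet_tokenized: list) -> list:
--     """Three staged passes: find every full-match position, greedily select the
--     leftmost non-overlapping ones, then stitch the output from the untouched
--     stretches and tags."""
--     if not tweet_tokenized:
--         return []
--     n = len(drugName)
--     # pass 1: every position where the whole drug name occurs
--     occ = [j for j in range(len(tweet_tokenized) - n + 1)
--            if tweet_tokenized[j:j + n] == drugName]
--     # pass 2: greedy leftmost non-overlapping selection
--     sel = []
--     free = 0
--     for j in occ:
--         if j >= free:
--             sel.append(j)
--             free = j + n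
--     # pass 3: stitch the result together
--     out = []
--     prev = 0
--     for j in sel:
--         out.extend(tweet_tokenized[prev:j])
--         out.append('__@DRUG@__')
--         prev = j + n
--     out.extend(tweet_tokenized[prev:])
--     return out
-- ===== Notes on version B (the rewrite author's own statement) =====
-- stated objective: alternative
-- what changed: A's single interleaved scan (first-token guard, inner verify loop, inline replacement) is replaced by three staged passes: collect every full-match start position, greedily pick the leftmost non-overlapping ones, then stitch the output from the untouched stretches and tags.
import Mathlib
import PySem

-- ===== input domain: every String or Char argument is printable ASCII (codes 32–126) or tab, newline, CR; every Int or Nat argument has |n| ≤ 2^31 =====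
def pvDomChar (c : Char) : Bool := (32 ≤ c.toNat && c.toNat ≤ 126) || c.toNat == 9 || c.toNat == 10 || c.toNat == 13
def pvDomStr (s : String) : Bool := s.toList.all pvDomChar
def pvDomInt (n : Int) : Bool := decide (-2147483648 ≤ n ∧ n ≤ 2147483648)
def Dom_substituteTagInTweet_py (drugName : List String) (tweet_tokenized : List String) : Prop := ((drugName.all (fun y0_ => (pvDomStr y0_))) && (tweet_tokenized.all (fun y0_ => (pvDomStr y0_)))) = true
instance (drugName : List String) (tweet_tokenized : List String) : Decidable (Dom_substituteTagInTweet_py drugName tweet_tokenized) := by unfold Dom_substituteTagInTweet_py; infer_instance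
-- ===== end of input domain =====

-- B replaces A's single interleaved scan by three staged passes (collect match
-- positions, greedy non-overlapping selection, stitch) — objective: alternative.

-- ===== PORT A =====
-- inner `for drugTk in drugName` loop with its break: state (isDrugName, posInTweet)
def pvAInner (tw : List String) : List String → Nat → Bool × Nat
  | [], pos => (true, pos)
  | d :: ds, pos =>
    if pos < tw.length ∧ tw.getD pos "" = d then pvAInner tw ds (pos + 1)
    else (false, pos)

-- outer while loop; fuel = tweet length makes it total (within Pre_ each step advances ind by ≥ 1)
def pvALoop : Nat → List String → List String → Nat → List String → List String
  | 0, _, _, _, acc => acc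
  | fuel + 1, dn, tw, ind, acc =>
    if ind < tw.length then
      let tk := tw.getD ind ""
      if tk ≠ dn.headD "" then pvALoop fuel dn tw (ind + 1) (acc ++ [tk])
      else
        if (pvAInner tw dn ind).1 = false then pvALoop fuel dn tw (ind + 1) (acc ++ [tk])
        else pvALoop fuel dn tw (ind + dn.length) (acc ++ ["__@DRUG@__"])
    else acc

def substituteTagInTweet_py (drugName : List String) (tweet_tokenized : List String) : List String :=
  pvALoop tweet_tokenized.length drugName tweet_tokenized 0 []

-- ===== PORT B =====
-- pass 1: [j for j in range(len(tw)-n+1) if tw[j:j+n] == drugName]; over ints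
-- len(tw)-n+1 = len(tw)+1-n, and the slice tw[j:j+n] with 0 ≤ j is drop/take (exact here)
def pvBOcc (dn tw : List String) : List Nat :=
  (List.range (tw.length + 1 - dn.length)).filter (fun j => (tw.drop j).take dn.length == dn)

-- pass 2: the `for j in occ` loop over state (sel, free); `j >= free` on these Nats is free ≤ j
def pvBSelStep (n : Nat) (p : List Nat × Nat) (j : Nat) : List Nat × Nat :=
  if p.2 ≤ j then (p.1 ++ [j], j + n) else p

-- pass 3: the `for j in sel` loop over state (out, prev); slices tw[prev:j], tw[prev:] are drop/take
def pvBStitchStep (tw : List String) (n : Nat) (p : List String × Nat) (j : Nat) : List String × Nat :=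
  (p.1 ++ (tw.drop p.2).take (j - p.2) ++ ["__@DRUG@__"], j + n)

def substituteTagInTweet_py_alt (drugName : List String) (tweet_tokenized : List String) : List String :=
  if tweet_tokenized = [] then []
  else
    (((pvBOcc drugName tweet_tokenized).foldl (pvBSelStep drugName.length) ([], 0)).1.foldl
        (pvBStitchStep tweet_tokenized drugName.length) ([], 0)).1
      ++ tweet_tokenized.drop
        (((pvBOcc drugName tweet_tokenized).foldl (pvBSelStep drugName.length) ([], 0)).1.foldl
          (pvBStitchStep tweet_tokenized drugName.length) ([], 0)).2

-- ===== PRECONDITION & SPEC =====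
-- Pre_ excludes empty drugName with a nonempty tweet: there A raises IndexError (drugName[0]).
def Pre_substituteTagInTweet_py (drugName : List String) (tweet_tokenized : List String) : Prop :=
  drugName ≠ [] ∨ tweet_tokenized = []
instance (drugName : List String) (tweet_tokenized : List String) : Decidable (Pre_substituteTagInTweet_py drugName tweet_tokenized) := by unfold Pre_substituteTagInTweet_py; infer_instance

def pvWitness_substituteTagInTweet_py : List String × List String :=
  (["advil"], ["i", "took", "advil", "today"])

def Spec_substituteTagInTweet_py (drugName : List String) (tweet_tokenized : List String) (out : List String) : Prop := out = substituteTagInTweet_py_alt drugName tweet_tokenized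
instance (drugName : List String) (tweet_tokenized : List String) (out : List String) : Decidable (Spec_substituteTagInTweet_py drugName tweet_tokenized out) := by unfold Spec_substituteTagInTweet_py; infer_instance

-- ===== CLAIM (what is proved, stated in full; the proofs are below) =====
def Claim_equal_substituteTagInTweet_py : Prop := ∀ (drugName : List String) (tweet_tokenized : List String), Dom_substituteTagInTweet_py drugName tweet_tokenized → Pre_substituteTagInTweet_py drugName tweet_tokenized → Spec_substituteTagInTweet_py drugName tweet_tokenized (substituteTagInTweet_py drugName tweet_tokenized)

-- ===== LEMMAS AND PROOFS =====

-- proof-side recursive forms of B's two folds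
def pvGreedy (n : Nat) : List Nat → Nat → List Nat
  | [], _ => []
  | j :: js, free => if free ≤ j then j :: pvGreedy n js (j + n) else pvGreedy n js free

def pvStitch (tw : List String) (n : Nat) : List Nat → Nat → List String
  | [], prev => tw.drop prev
  | j :: js, prev => (tw.drop prev).take (j - prev) ++ "__@DRUG@__" :: pvStitch tw n js (j + n)

-- A's inner loop succeeds exactly when the drug name is the prefix of the tweet suffix at pos
lemma pvAInner_true_iff (tw : List String) :
    ∀ (dn : List String) (pos : Nat),
      (pvAInner tw dn pos).1 = true ↔ (tw.drop pos).take dn.length = dn := by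
  intro dn
  induction dn with
  | nil => intro pos; simp only [pvAInner, List.length_nil, List.take_zero]
  | cons d ds ih =>
    intro pos
    by_cases h : pos < tw.length
    · have hdrop : tw.drop pos = tw[pos] :: tw.drop (pos + 1) :=
        List.drop_eq_getElem_cons h
      have hgetD : tw.getD pos "" = tw[pos] := by
        simp [List.getD_eq_getElem?_getD, List.getElem?_eq_getElem h]
      constructor
      · intro htrue
        rw [pvAInner] at htrue
        by_cases hc : pos < tw.length ∧ tw.getD pos "" = d
        · rw [if_pos hc] at htrue
          have hih := (ih (pos + 1)).mp htrue
          rw [hdrop]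
          simp only [List.length_cons, List.take_succ_cons, List.cons.injEq]
          exact ⟨by rw [← hgetD]; exact hc.2, hih⟩
        · rw [if_neg hc] at htrue; exact absurd htrue (by simp)
      · intro hpre
        rw [hdrop] at hpre
        simp only [List.length_cons, List.take_succ_cons, List.cons.injEq] at hpre
        have hc : pos < tw.length ∧ tw.getD pos "" = d := ⟨h, by rw [hgetD, hpre.1]⟩
        rw [pvAInner, if_pos hc]
        exact (ih (pos + 1)).mpr hpre.2
    · have hdrop : tw.drop pos = [] := List.drop_eq_nil_of_le (by omega)
      rw [pvAInner, if_neg (by intro hc; exact h hc.1)]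
      simp [hdrop]

-- past the end A's loop returns the accumulator
lemma pvALoop_out (dn tw : List String) (fuel i : Nat) (acc : List String)
    (h : ¬ i < tw.length) : pvALoop fuel dn tw i acc = acc := by
  cases fuel with
  | zero => rfl
  | succ fuel => simp only [pvALoop, if_neg h]

-- one A-step at a position where the drug name matches
lemma pvALoop_match_step (dn tw : List String) (hdn : dn ≠ []) (f j : Nat)
    (acc : List String) (h : j < tw.length)
    (hp : (tw.drop j).take dn.length = dn) :
    pvALoop (f + 1) dn tw j acc = pvALoop f dn tw (j + dn.length) (acc ++ ["__@DRUG@__"]) := by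
  obtain ⟨d, ds, rfl⟩ := List.exists_cons_of_ne_nil hdn
  have hp' := hp
  rw [List.drop_eq_getElem_cons h] at hp'
  simp only [List.length_cons, List.take_succ_cons, List.cons.injEq] at hp'
  have hinner : (pvAInner tw (d :: ds) j).1 = true :=
    (pvAInner_true_iff tw (d :: ds) j).mpr hp
  have hopt : tw[j]?.getD "" = d := by
    rw [List.getElem?_eq_getElem h]; simpa using hp'.1
  simp only [pvALoop]
  rw [if_pos h, if_neg (by simp [hopt]), if_neg (by simp [hinner])]

-- one A-step at a position where the drug name does not match
lemma pvALoop_miss_step (dn tw : List String) (f j : Nat)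
    (acc : List String) (h : j < tw.length)
    (hp : ¬ (tw.drop j).take dn.length = dn) :
    pvALoop (f + 1) dn tw j acc = pvALoop f dn tw (j + 1) (acc ++ [tw.getD j ""]) := by
  have hinner : (pvAInner tw dn j).1 = false := by
    cases hb : (pvAInner tw dn j).1 with
    | false => rfl
    | true => exact absurd ((pvAInner_true_iff tw dn j).mp hb) hp
  by_cases he : tw.getD j "" = dn.headD ""
  · simp only [pvALoop]
    rw [if_pos h, if_neg (by simp only [ne_eq, not_not]; exact he), if_pos hinner]
  · simp only [pvALoop]
    rw [if_pos h, if_pos he]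

-- B's select fold equals the recursive greedy selection
lemma foldl_sel_eq_greedy (n : Nat) :
    ∀ (l : List Nat) (sel : List Nat) (free : Nat),
      (l.foldl (pvBSelStep n) (sel, free)).1 = sel ++ pvGreedy n l free := by
  intro l
  induction l with
  | nil => intro sel free; simp [pvGreedy]
  | cons j js ih =>
    intro sel free
    by_cases h : free ≤ j
    · simp only [List.foldl_cons, pvBSelStep, if_pos h, pvGreedy, ih]
      simp
    · simp only [List.foldl_cons, pvBSelStep, if_neg h, pvGreedy, ih]

-- B's stitch fold (plus the final tail copy) equals the recursive stitch
lemma foldl_stitch_eq (tw : List String) (n : Nat) :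
    ∀ (sel : List Nat) (acc : List String) (prev : Nat),
      (sel.foldl (pvBStitchStep tw n) (acc, prev)).1
        ++ tw.drop (sel.foldl (pvBStitchStep tw n) (acc, prev)).2
      = acc ++ pvStitch tw n sel prev := by
  intro sel
  induction sel with
  | nil => intro acc prev; simp [pvStitch]
  | cons j js ih =>
    intro acc prev
    simp only [List.foldl_cons, pvBStitchStep, pvStitch, ih]
    simp

-- greedy ignores how far a filter threshold lags behind the free pointer
lemma greedy_filter_absorb (n : Nat) :
    ∀ (l : List Nat) (a free : Nat), a ≤ free →
      pvGreedy n (l.filter (fun j => a ≤ j)) free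
        = pvGreedy n (l.filter (fun j => free ≤ j)) free := by
  intro l
  induction l with
  | nil => intro a free _; rfl
  | cons j js ih =>
    intro a free haf
    by_cases hf : free ≤ j
    · have ha : a ≤ j := le_trans haf hf
      simp only [List.filter_cons, decide_eq_true_eq, if_pos ha, pvGreedy,
        if_pos hf, List.cons.injEq, true_and]
      rw [ih a (j + n) (by omega), ih free (j + n) (by omega)]
    · by_cases ha : a ≤ j
      · simp only [List.filter_cons, decide_eq_true_eq, if_pos ha, pvGreedy,
          if_neg hf]
        exact ih a free haf
      · simp only [List.filter_cons, decide_eq_true_eq, if_neg ha, if_neg hf]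
        exact ih a free haf
  -- note: the `decide` wrappers come from List.filter on a Prop-valued predicate

-- greedy only cares whether free clears each element
lemma greedy_congr_free (n : Nat) :
    ∀ (l : List Nat) (f g : Nat), (∀ j ∈ l, (f ≤ j ↔ g ≤ j)) →
      pvGreedy n l f = pvGreedy n l g := by
  intro l
  induction l with
  | nil => intro f g _; rfl
  | cons j js ih =>
    intro f g h
    by_cases hf : f ≤ j
    · have hg : g ≤ j := (h j (by simp)).mp hf
      simp only [pvGreedy, if_pos hf, if_pos hg]
    · have hg : ¬ g ≤ j := fun hg => hf ((h j (by simp)).mpr hg)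
      simp only [pvGreedy, if_neg hf, if_neg hg]
      exact ih f g (fun x hx => h x (by simp [hx]))

-- greedy returns elements of its input
lemma greedy_mem (n : Nat) :
    ∀ (l : List Nat) (f x : Nat), x ∈ pvGreedy n l f → x ∈ l := by
  intro l
  induction l with
  | nil => intro f x h; exact absurd h (by simp [pvGreedy])
  | cons j js ih =>
    intro f x h
    by_cases hf : f ≤ j
    · rw [pvGreedy, if_pos hf] at h
      rcases List.mem_cons.mp h with h | h
      · simp [h]
      · exact List.mem_cons_of_mem _ (ih _ x h)
    · rw [pvGreedy, if_neg hf] at h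
      exact List.mem_cons_of_mem _ (ih _ x h)

-- a strictly sorted list containing i: the ≥ i filter peels i off the front
lemma filter_ge_cons_of_mem :
    ∀ (l : List Nat) (i : Nat), l.Pairwise (· < ·) → i ∈ l →
      l.filter (fun j => i ≤ j) = i :: l.filter (fun j => i + 1 ≤ j) := by
  intro l
  induction l with
  | nil => intro i _ h; exact absurd h (by simp)
  | cons x xs ih =>
    intro i hp hm
    have hall : ∀ e ∈ xs, x < e := (List.pairwise_cons.mp hp).1
    rcases List.mem_cons.mp hm with rfl | hm
    · simp only [List.filter_cons, decide_eq_true_eq, if_pos (le_refl i),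
        if_neg (by omega : ¬ i + 1 ≤ i), List.cons.injEq, true_and]
      exact List.filter_congr (fun e he => by
        have := hall e he
        simp only [decide_eq_decide]; omega)
    · have hx : x < i := hall i hm
      simp only [List.filter_cons, decide_eq_true_eq,
        if_neg (by omega : ¬ i ≤ x), if_neg (by omega : ¬ i + 1 ≤ x)]
      exact ih i (List.pairwise_cons.mp hp).2 hm

-- membership in B's occurrence list
lemma mem_pvBOcc (dn tw : List String) (j : Nat) :
    j ∈ pvBOcc dn tw ↔ j < tw.length + 1 - dn.length ∧ (tw.drop j).take dn.length = dn := by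
  simp [pvBOcc, List.mem_filter, List.mem_range]

lemma pvBOcc_sorted (dn tw : List String) : (pvBOcc dn tw).Pairwise (· < ·) :=
  List.Pairwise.filter _ (List.pairwise_lt_range)

-- a full match at j fits inside the tweet
lemma match_bound (dn tw : List String) (j : Nat) (hj : j < tw.length)
    (hp : (tw.drop j).take dn.length = dn) : j + dn.length ≤ tw.length := by
  have hlen : ((tw.drop j).take dn.length).length = dn.length := by rw [hp]
  rw [List.length_take, List.length_drop] at hlen
  omega

-- stitching from one position earlier over selections that all start later
lemma stitch_shift (tw : List String) (n : Nat) (S : List Nat) (i : Nat)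
    (hi : i < tw.length) (hS : ∀ j ∈ S, i + 1 ≤ j) :
    pvStitch tw n S i = tw.getD i "" :: pvStitch tw n S (i + 1) := by
  have hone : tw.drop i = tw.getD i "" :: tw.drop (i + 1) := by
    rw [List.drop_eq_getElem_cons hi]
    simp [List.getD_eq_getElem?_getD, List.getElem?_eq_getElem hi]
  cases S with
  | nil => simp only [pvStitch]; exact hone
  | cons j js =>
    have hj : i + 1 ≤ j := hS j (by simp)
    simp only [pvStitch]
    rw [hone, show j - i = (j - (i + 1)) + 1 by omega, List.take_succ_cons]
    simp [show j - (i + 1) = j - i - 1 by omega]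

-- main correspondence: A's interleaved loop computes stitch∘greedy of the occurrence list
lemma pvALoop_eq_stitch (dn tw : List String) (hdn : dn ≠ []) :
    ∀ (fuel i : Nat) (acc : List String), tw.length ≤ fuel + i →
      pvALoop fuel dn tw i acc
        = acc ++ pvStitch tw dn.length
            (pvGreedy dn.length ((pvBOcc dn tw).filter (fun j => i ≤ j)) i) i := by
  have hn : 1 ≤ dn.length := List.length_pos_iff.mpr hdn
  intro fuel
  induction fuel with
  | zero =>
    intro i acc hfi
    have hiN : ¬ i < tw.length := by omega
    rw [pvALoop_out dn tw 0 i acc hiN]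
    have hfil : (pvBOcc dn tw).filter (fun j => i ≤ j) = [] := by
      rw [List.filter_eq_nil_iff]
      intro j hj
      have := (mem_pvBOcc dn tw j).mp hj
      simp only [decide_eq_true_eq]
      omega
    rw [hfil]
    simp [pvGreedy, pvStitch, List.drop_eq_nil_of_le (by omega : tw.length ≤ i)]
  | succ fuel ih =>
    intro i acc hfi
    by_cases hiN : i < tw.length
    · by_cases hm : (tw.drop i).take dn.length = dn
      · -- match at i
        have hocc : i ∈ pvBOcc dn tw := (mem_pvBOcc dn tw i).mpr
          ⟨by have := match_bound dn tw i hiN hm; omega, hm⟩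
        have hpeel := filter_ge_cons_of_mem (pvBOcc dn tw) i (pvBOcc_sorted dn tw) hocc
        rw [pvALoop_match_step dn tw hdn fuel i acc hiN hm,
          ih (i + dn.length) (acc ++ ["__@DRUG@__"]) (by omega), hpeel]
        simp only [pvGreedy, if_pos (le_refl i)]
        rw [greedy_filter_absorb dn.length (pvBOcc dn tw) (i + 1) (i + dn.length) (by omega)]
        simp [pvStitch]
      · -- no match at i
        have hnot : i ∉ pvBOcc dn tw := fun h => hm ((mem_pvBOcc dn tw i).mp h).2
        have hfil : (pvBOcc dn tw).filter (fun j => i ≤ j)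
            = (pvBOcc dn tw).filter (fun j => i + 1 ≤ j) :=
          List.filter_congr (fun x hx => by
            have hxi : x ≠ i := fun h => hnot (h ▸ hx)
            simp only [decide_eq_decide]; omega)
        have hL : ∀ j ∈ (pvBOcc dn tw).filter (fun j => i + 1 ≤ j), i + 1 ≤ j :=
          fun j hj => by simpa using (List.mem_filter.mp hj).2
        rw [pvALoop_miss_step dn tw fuel i acc hiN hm,
          ih (i + 1) (acc ++ [tw.getD i ""]) (by omega), hfil,
          greedy_congr_free dn.length _ i (i + 1) (fun j hj => by
            have := hL j hj; omega),
          stitch_shift tw dn.length _ i hiN (fun j hj => hL j (greedy_mem _ _ _ _ hj))]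
        simp
    · rw [pvALoop_out dn tw (fuel + 1) i acc hiN]
      have hfil : (pvBOcc dn tw).filter (fun j => i ≤ j) = [] := by
        rw [List.filter_eq_nil_iff]
        intro j hj
        have := (mem_pvBOcc dn tw j).mp hj
        simp only [decide_eq_true_eq]
        omega
      rw [hfil]
      simp [pvGreedy, pvStitch, List.drop_eq_nil_of_le (by omega : tw.length ≤ i)]

-- ===== VERDICT (by name: the statement is the Claim_ definition above) =====
theorem substituteTagInTweet_py_spec : Claim_equal_substituteTagInTweet_py := by
  intro dn tw _ hpre
  unfold Spec_substituteTagInTweet_py substituteTagInTweet_py substituteTagInTweet_py_alt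
  rcases hpre with hdn | htw
  · by_cases htw : tw = []
    · subst htw; rfl
    · rw [if_neg htw]
      have h := pvALoop_eq_stitch dn tw hdn tw.length 0 [] (by omega)
      have hfil : (pvBOcc dn tw).filter (fun j => 0 ≤ j) = pvBOcc dn tw := by
        simp
      rw [hfil] at h
      rw [foldl_sel_eq_greedy, foldl_stitch_eq]
      simpa using h
  · subst htw; rfl
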